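-- pv_equiv track=rewrite | github.com/merma593/JoinedUp | ogmain.py | singlematch
-- ===== SOURCE A (Python) =====
-- def singlematch(word1, word2):
--     #Finds & compares suffix and prefix of 2 words
--     #Checks if singly linked
--     prefix = word1
--     suffix = word2
--     preLen = len(word1)
--     sufLen = len(word2)
--     if(preLen > sufLen):
--         prefix = prefix[preLen - sufLen:]
--     elif(preLen < sufLen):
--         suffix = suffix[:preLen]
--
--     while(suffix != prefix and len(suffix) > 0):
--         prefix = prefix[1:]
--         suffix = suffix[:len(suffix) - 1]
--
--     if(prefix == suffix):
--         if(len(prefix) < (preLen)/2 and len(prefix) < (sufLen)/2):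
--             return False
--         return True
-- ===== SOURCE B (Python) =====
-- def singlematch(word1, word2):
--     # Same decision, computed declaratively: the overlap is the largest j
--     # (scanned ascending, max taken) with word1's j-suffix == word2's j-prefix,
--     # and the threshold test is done in exact integer arithmetic.
--     n1, n2 = len(word1), len(word2)
--     k = max(j for j in range(min(n1, n2) + 1) if word1[n1 - j:] == word2[:j])
--     return 2 * k >= n1 or 2 * k >= n2
-- ===== Notes on version B (the rewrite author's own statement) =====
-- stated objective: alternative
-- what changed: Replaces A's destructive while-loop that shrinks both strings from the top until they coincide (plus a float-division threshold) by a single max-comprehension over all overlap lengths j in ascending order with direct slice comparisons and an integer-arithmetic threshold.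
import Mathlib
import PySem

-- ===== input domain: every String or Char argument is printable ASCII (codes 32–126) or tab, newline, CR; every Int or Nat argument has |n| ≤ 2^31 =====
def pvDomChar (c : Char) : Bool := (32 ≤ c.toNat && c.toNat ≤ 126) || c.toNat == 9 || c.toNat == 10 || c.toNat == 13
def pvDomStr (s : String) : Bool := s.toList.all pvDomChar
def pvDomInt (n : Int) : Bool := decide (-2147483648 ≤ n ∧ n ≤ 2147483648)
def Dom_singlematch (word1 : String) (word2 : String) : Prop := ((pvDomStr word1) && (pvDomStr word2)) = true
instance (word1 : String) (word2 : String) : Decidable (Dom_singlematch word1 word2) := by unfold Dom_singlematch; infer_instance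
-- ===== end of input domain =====

-- B replaces A's destructive shrink-until-equal while loop (and its float-division threshold) by an
-- ascending max-comprehension over overlap lengths with slice comparisons and an integer threshold
-- (alternative decomposition, same asymptotic cost).

-- ===== PORT A =====
-- the while loop: prefix = prefix[1:]; suffix = suffix[:len(suffix)-1] until suffix == prefix or suffix empty
def singlematchLoop (pre suf : List Char) : List Char × List Char :=
  if suf ≠ pre ∧ suf.length > 0 then
    singlematchLoop (PySem.List.slice pre (some 1) none)
      (PySem.List.slice suf none (some ((suf.length : Int) - 1)))
  else (pre, suf)
termination_by suf.length
decreasing_by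
  have h1 : ((suf.length : Int) - 1) = ((suf.length - 1 : Nat) : Int) := by omega
  rw [h1, PySem.List.slice_to_natCast, List.length_take]
  omega



def singlematch (word1 : String) (word2 : String) : Bool :=
  let preLen : Int := PySem.Str.len word1
  let sufLen : Int := PySem.Str.len word2
  -- the if/elif aligning the two pieces to the same length
  let ps : List Char × List Char :=
    if preLen > sufLen then
      (PySem.List.slice word1.toList (some (preLen - sufLen)) none, word2.toList)
    else if preLen < sufLen then
      (word1.toList, PySem.List.slice word2.toList none (some preLen))
    else (word1.toList, word2.toList)
  let r := singlematchLoop ps.1 ps.2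
  if r.1 = r.2 then
    -- Python compares len(prefix) < preLen/2 with float '/': exact on ints as 2*len < preLen
    if 2 * (r.1.length : Int) < preLen ∧ 2 * (r.1.length : Int) < sufLen then false
    else true
  else false  -- unreachable (the loop only exits with suffix == prefix); Python would return None here

-- ===== PORT B =====
def singlematch_alt (word1 : String) (word2 : String) : Bool :=
  let n1 : Int := PySem.Str.len word1
  let n2 : Int := PySem.Str.len word2
  let cands := (PySem.List.pyRange 0 (min n1 n2 + 1) 1).filter
    (fun j => PySem.List.slice word1.toList (some (n1 - j)) none ==
              PySem.List.slice word2.toList none (some j))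
  -- Python's max(...) over the generator; it is never empty (j = 0 always matches), so getD 0 is unreachable
  let k := (PySem.List.max? cands (fun x => x)).getD 0
  decide (2 * k ≥ n1 ∨ 2 * k ≥ n2)

-- ===== PRECONDITION & SPEC =====
def Spec_singlematch (word1 : String) (word2 : String) (out : Bool) : Prop := out = singlematch_alt word1 word2
instance (word1 : String) (word2 : String) (out : Bool) : Decidable (Spec_singlematch word1 word2 out) := by unfold Spec_singlematch; infer_instance

-- ===== CLAIM (what is proved, stated in full; the proofs are below) =====
def Claim_equal_singlematch : Prop := ∀ (word1 : String) (word2 : String), Dom_singlematch word1 word2 → Spec_singlematch word1 word2 (singlematch word1 word2)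

-- ===== LEMMAS AND PROOFS =====

theorem singlematchLoop_spec (n : ℕ) :
    ∀ p s : List Char, p.length = n → s.length = n →
    ∃ k, k ≤ n ∧ singlematchLoop p s = (p.drop (n - k), s.take k) ∧
      p.drop (n - k) = s.take k ∧
      (∀ j, k < j → j ≤ n → p.drop (n - j) ≠ s.take j) := by
  induction n with
  | zero =>
    intro p s hp hs
    obtain rfl : p = [] := List.length_eq_zero_iff.mp hp
    obtain rfl : s = [] := List.length_eq_zero_iff.mp hs
    refine ⟨0, le_rfl, ?_, rfl, ?_⟩
    · rw [singlematchLoop]; simp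
    · intro j hj hj'; omega
  | succ n ih =>
    intro p s hp hs
    by_cases hps : p = s
    · refine ⟨n + 1, le_rfl, ?_, ?_, ?_⟩
      · rw [singlematchLoop]
        simp [hps, List.take_of_length_le (le_of_eq hs)]
      · simp [hps, List.take_of_length_le (le_of_eq hs)]
      · intro j hj hj'; omega
    · have hcond : s ≠ p ∧ s.length > 0 := ⟨fun h => hps h.symm, by omega⟩
      have hstep : singlematchLoop p s = singlematchLoop p.tail (s.take n) := by
        rw [singlematchLoop]
        have h1 : ((s.length : Int) - 1) = ((n : Nat) : Int) := by omega
        rw [if_pos hcond, PySem.List.slice_from_one, h1, PySem.List.slice_to_natCast]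
      obtain ⟨k, hk, hloop, hmatch, hmax⟩ := ih p.tail (s.take n)
        (by simp [hp]) (by simp [hs])
      have htail : ∀ j : ℕ, j ≤ n → p.tail.drop (n - j) = p.drop (n + 1 - j) := by
        intro j hj
        rw [List.drop_tail]
        congr 1
        omega
      have htake : ∀ j : ℕ, j ≤ n → (s.take n).take j = s.take j := by
        intro j hj
        rw [List.take_take]
        congr 1
        omega
      refine ⟨k, by omega, ?_, ?_, ?_⟩
      · rw [hstep, hloop, htail k hk, htake k hk]
      · rw [← htail k hk, ← htake k hk]; exact hmatch
      · intro j hj hj'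
        by_cases hjn : j ≤ n
        · rw [← htail j hjn, ← htake j hjn]; exact hmax j hj hjn
        · have hje : j = n + 1 := by omega
          subst hje
          rw [Nat.sub_self, List.drop_zero, List.take_of_length_le (le_of_eq hs)]
          exact hps

-- the aligned pieces of A are s1.drop (n1 - m) and s2.take m, m = min
theorem aligned_spec (word1 word2 : String) :
    ∃ k : ℕ, k ≤ min word1.toList.length word2.toList.length ∧
      singlematch word1 word2 =
        (if 2 * (k : Int) < (word1.toList.length : Int) ∧ 2 * (k : Int) < (word2.toList.length : Int)
         then false else true) ∧
      word1.toList.drop (word1.toList.length - k) = word2.toList.take k ∧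
      (∀ j, k < j → j ≤ min word1.toList.length word2.toList.length →
        word1.toList.drop (word1.toList.length - j) ≠ word2.toList.take j) := by
  set s1 := word1.toList with hs1
  set s2 := word2.toList with hs2
  set n1 := s1.length with hn1
  set n2 := s2.length with hn2
  set m := min n1 n2 with hm
  obtain ⟨k, hk, hloop, hmatch, hmax⟩ :=
    singlematchLoop_spec m (s1.drop (n1 - m)) (s2.take m)
      (by rw [List.length_drop]; omega) (by rw [List.length_take]; omega)
  have hdropdrop : ∀ j : ℕ, j ≤ m → (s1.drop (n1 - m)).drop (m - j) = s1.drop (n1 - j) := by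
    intro j hj; rw [List.drop_drop]; congr 1; omega
  have htaketake : ∀ j : ℕ, j ≤ m → (s2.take m).take j = s2.take j := by
    intro j hj; rw [List.take_take]; congr 1; omega
  refine ⟨k, hk, ?_, ?_, ?_⟩
  · unfold singlematch
    have hps : (if (PySem.Str.len word1) > (PySem.Str.len word2) then
        (PySem.List.slice word1.toList (some ((PySem.Str.len word1) - (PySem.Str.len word2))) none, word2.toList)
      else if (PySem.Str.len word1) < (PySem.Str.len word2) then
        (word1.toList, PySem.List.slice word2.toList none (some (PySem.Str.len word1)))
      else (word1.toList, word2.toList)) = (s1.drop (n1 - m), s2.take m) := by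
      simp only [PySem.Str.len_eq, ← hs1, ← hs2, ← hn1, ← hn2]
      split_ifs with h1 h2
      · have hmn : m = n2 := by omega
        have he : ((n1 : Int) - (n2 : Int)) = ((n1 - n2 : Nat) : Int) := by omega
        rw [he, PySem.List.slice_from _ (by positivity), Int.toNat_natCast, hmn,
          List.take_of_length_le (le_of_eq hn2.symm)]
      · have hmn : m = n1 := by omega
        rw [show ((n1 : Nat) : Int) = ((n1 : Nat) : Int) from rfl, PySem.List.slice_to_natCast, hmn,
          Nat.sub_self, List.drop_zero]
      · rw [show n1 - m = 0 by omega, List.drop_zero, show m = n2 by omega,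
          List.take_of_length_le (le_of_eq hn2.symm)]
    simp only [PySem.Str.len_eq, ← hs1, ← hs2, ← hn1, ← hn2] at hps ⊢
    rw [hps, hloop]
    have hklen : ((s1.drop (n1 - m)).drop (m - k)).length = k := by
      rw [List.length_drop, List.length_drop]; omega
    rw [if_pos hmatch, hklen]
  · rw [← hdropdrop k hk, ← htaketake k hk]; exact hmatch
  · intro j hj hj'
    rw [← hdropdrop j hj', ← htaketake j hj']
    exact hmax j hj hj'

theorem alt_eq (word1 word2 : String) (k : ℕ)
    (hk : k ≤ min word1.toList.length word2.toList.length)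
    (hmatch : word1.toList.drop (word1.toList.length - k) = word2.toList.take k)
    (hmax : ∀ j, k < j → j ≤ min word1.toList.length word2.toList.length →
      word1.toList.drop (word1.toList.length - j) ≠ word2.toList.take j) :
    singlematch_alt word1 word2 =
      decide (2 * (k : Int) ≥ (word1.toList.length : Int) ∨ 2 * (k : Int) ≥ (word2.toList.length : Int)) := by
  set s1 := word1.toList with hs1
  set s2 := word2.toList with hs2
  set n1 := s1.length with hn1
  set n2 := s2.length with hn2
  set m := min n1 n2 with hm
  -- B's per-candidate test, on a natural j ≤ m, is exactly the drop/take match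
  have hcond : ∀ jn : ℕ, jn ≤ m →
      ((PySem.List.slice s1 (some ((n1 : Int) - (jn : Int))) none ==
        PySem.List.slice s2 none (some ((jn : Nat) : Int))) = true ↔
        s1.drop (n1 - jn) = s2.take jn) := by
    intro jn hj
    have he : ((n1 : Int) - (jn : Int)) = ((n1 - jn : Nat) : Int) := by omega
    rw [he, PySem.List.slice_from _ (by positivity), Int.toNat_natCast, PySem.List.slice_to_natCast]
    simp
  unfold singlematch_alt
  simp only [PySem.Str.len_eq, ← hs1, ← hs2, ← hn1, ← hn2]
  set f : Int → Bool := fun j => PySem.List.slice s1 (some ((n1 : Int) - j)) none ==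
              PySem.List.slice s2 none (some j) with hf
  set cands := (PySem.List.pyRange 0 (min (n1 : Int) (n2 : Int) + 1) 1).filter f with hcands
  have hmemrange : ∀ j : Int,
      j ∈ PySem.List.pyRange 0 (min (n1 : Int) (n2 : Int) + 1) 1 ↔ 0 ≤ j ∧ j ≤ (m : Int) := by
    intro j
    rw [PySem.List.mem_pyRange_one]
    omega
  have hkmem : (k : Int) ∈ cands := by
    rw [hcands, List.mem_filter]
    exact ⟨(hmemrange _).mpr ⟨by positivity, by omega⟩, (hcond k hk).mpr hmatch⟩
  obtain ⟨mx, hmx⟩ : ∃ mx, PySem.List.max? cands (fun x => x) = some mx := by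
    cases hmo : PySem.List.max? cands (fun x => x) with
    | none =>
      rw [PySem.List.max?_eq_none_iff] at hmo
      rw [hmo] at hkmem
      simp at hkmem
    | some mx => exact ⟨mx, rfl⟩
  have hmxmem := PySem.List.max?_mem hmx
  rw [hcands, List.mem_filter] at hmxmem
  obtain ⟨hmxr, hmxf⟩ := hmxmem
  obtain ⟨hmx0, hmxm⟩ := (hmemrange mx).mp hmxr
  have hle : (k : Int) ≤ mx := PySem.List.max?_isMax hmx _ hkmem
  have hmxle : mx.toNat ≤ m := by omega
  have hmxmatch : s1.drop (n1 - mx.toNat) = s2.take mx.toNat := by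
    refine (hcond mx.toNat hmxle).mp ?_
    rw [show ((mx.toNat : Nat) : Int) = mx by omega]
    exact hmxf
  have hmxk : mx = (k : Int) := by
    by_contra hne
    exact hmax mx.toNat (by omega) hmxle hmxmatch
  rw [hmx, hmxk]
  simp

theorem singlematch_spec_aux (word1 word2 : String) :
    singlematch word1 word2 = singlematch_alt word1 word2 := by
  obtain ⟨k, hk, hA, hmatch, hmax⟩ := aligned_spec word1 word2
  rw [hA, alt_eq word1 word2 k hk hmatch hmax]
  by_cases hc : 2 * (k : Int) < (word1.toList.length : Int) ∧ 2 * (k : Int) < (word2.toList.length : Int)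
  · rw [if_pos hc]
    symm
    rw [decide_eq_false_iff_not]
    omega
  · rw [if_neg hc]
    symm
    rw [decide_eq_true_eq]
    omega

-- ===== VERDICT (by name: the statement is the Claim_ definition above) =====
theorem singlematch_spec : Claim_equal_singlematch := by
  intro word1 word2 _
  unfold Spec_singlematch
  exact singlematch_spec_aux word1 word2
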